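-- pv_equiv track=rewrite | github.com/e6data/e6-public-benchmarks | jmeter_benchmarks/jmeter-jdbc-test-framework/utilities/jmeter_s3_utils.py | normalize_query_name
-- ===== SOURCE A (Python) =====
-- def normalize_query_name(query_name: str, source_engine: str) -> str:
--     """
--     Normalize query names between different engines.
--
--     E6Data format: query-2-TPCDS-2
--     Databricks format: TPCDS-2
--     """
--     # If already in TPCDS-X format, return as-is
--     if query_name.startswith('TPCDS-'):
--         return query_name
--
--     # If in E6Data format (query-X-TPCDS-Y), extract TPCDS-Y
--     if source_engine == 'e6data' and query_name.startswith('query-'):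
--         parts = query_name.split('-')
--         # Find TPCDS part
--         for i, part in enumerate(parts):
--             if part == 'TPCDS' and i + 1 < len(parts):
--                 return f"TPCDS-{parts[i+1]}"
--
--     return query_name
-- ===== SOURCE B (Python) =====
-- def normalize_query_name(query_name: str, source_engine: str) -> str:
--     """Normalize query names between engines by locating the '-TPCDS-' anchor
--     directly in the string instead of splitting it into parts."""
--     # If already in TPCDS-X format, return as-is
--     if query_name.startswith('TPCDS-'):
--         return query_name
--
--     # E6Data format: take the component right after the first '-TPCDS-' anchor
--     if source_engine == 'e6data' and query_name.startswith('query-'):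
--         p = query_name.find('-TPCDS-')
--         if p != -1:
--             rest = query_name[p + 7:]
--             q = rest.find('-')
--             nxt = rest if q == -1 else rest[:q]
--             return f"TPCDS-{nxt}"
--
--     return query_name
-- ===== Notes on version B (the rewrite author's own statement) =====
-- stated objective: idiomatic
-- what changed: B drops the split('-') list and the enumerate loop entirely and instead locates the first '-TPCDS-' substring with str.find, then slices out the next dash-delimited component (empty allowed), which is provably the same token A's part scan returns.
import Mathlib
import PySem

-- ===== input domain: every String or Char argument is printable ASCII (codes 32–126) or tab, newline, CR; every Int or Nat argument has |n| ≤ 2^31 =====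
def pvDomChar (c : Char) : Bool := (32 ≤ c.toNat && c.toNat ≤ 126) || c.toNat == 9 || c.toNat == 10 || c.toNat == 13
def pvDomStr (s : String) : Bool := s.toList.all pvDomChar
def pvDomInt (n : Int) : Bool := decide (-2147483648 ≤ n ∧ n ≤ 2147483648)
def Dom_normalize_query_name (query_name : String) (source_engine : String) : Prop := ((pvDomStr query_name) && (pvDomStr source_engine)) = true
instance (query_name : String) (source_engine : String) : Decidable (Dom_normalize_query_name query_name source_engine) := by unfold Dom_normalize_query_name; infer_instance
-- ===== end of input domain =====

-- B replaces A's split-into-parts + enumerate scan by a single substring search for the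
-- '-TPCDS-' anchor followed by taking the next dash-delimited component (objective: idiomatic).

-- ===== PORT A =====
-- the "for i, part in enumerate(parts): if part == 'TPCDS' and i + 1 < len(parts): return …" loop
def pvALoop (parts : List (List Char)) : List (Int × List Char) → Option (List Char)
  | [] => none
  | (i, part) :: rest =>
    if part = "TPCDS".toList ∧ i + 1 < (parts.length : Int) then
      match PySem.List.pyGet? parts (i + 1) with
      | some nxt => some ("TPCDS-".toList ++ nxt)
      | none => none
    else pvALoop parts rest

def normalize_query_name (query_name : String) (source_engine : String) : String :=
  if PySem.Str.startswith query_name "TPCDS-" then query_name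
  else if source_engine == "e6data" && PySem.Str.startswith query_name "query-" then
    let parts := PySem.Chars.splitOn query_name.toList "-".toList
    match pvALoop parts (PySem.List.enumerate parts 0) with
    | some r => String.ofList r
    | none => query_name
  else query_name

-- ===== PORT B =====
def normalize_query_name_alt (query_name : String) (source_engine : String) : String :=
  if PySem.Str.startswith query_name "TPCDS-" then query_name
  else if source_engine == "e6data" && PySem.Str.startswith query_name "query-" then
    let p := PySem.Chars.find query_name.toList "-TPCDS-".toList
    if p ≠ -1 then
      let rest := PySem.Chars.slice query_name.toList (some (p + 7)) none
      let q := PySem.Chars.find rest "-".toList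
      let nxt := if q = -1 then rest else PySem.Chars.slice rest none (some q)
      String.ofList ("TPCDS-".toList ++ nxt)
    else query_name
  else query_name

-- ===== PRECONDITION & SPEC =====
def Spec_normalize_query_name (query_name : String) (source_engine : String) (out : String) : Prop := out = normalize_query_name_alt query_name source_engine
instance (query_name : String) (source_engine : String) (out : String) : Decidable (Spec_normalize_query_name query_name source_engine out) := by unfold Spec_normalize_query_name; infer_instance

-- ===== CLAIM (what is proved, stated in full; the proofs are below) =====
def Claim_equal_normalize_query_name : Prop := ∀ (query_name : String) (source_engine : String), Dom_normalize_query_name query_name source_engine → Spec_normalize_query_name query_name source_engine (normalize_query_name query_name source_engine)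

-- ===== LEMMAS AND PROOFS =====

def pvSplitAux : List Char → List Char → List (List Char)
  | [], cur => [cur.reverse]
  | c :: rest, cur => if c = '-' then cur.reverse :: pvSplitAux rest [] else pvSplitAux rest (c :: cur)

theorem pvGoLem (l : List Char) : ∀ (cur : List Char) (acc : List (List Char)),
    PySem.Chars.splitOn.go ['-'] (l.length + 1) l cur acc = acc.reverse ++ pvSplitAux l cur := by
  induction l with
  | nil => intro cur acc; rw [PySem.Chars.splitOn.go.eq_def]; simp [pvSplitAux]
  | cons c rest ih =>
    intro cur acc
    rw [PySem.Chars.splitOn.go.eq_def]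
    simp only [List.length_cons]
    by_cases hc : c = '-'
    · subst hc
      simp only [List.isPrefixOf]
      simp [ih, pvSplitAux]
    · have : ¬ ['-'].isPrefixOf (c :: rest) = true := by
        simp only [List.isPrefixOf, Bool.and_eq_true, beq_iff_eq, not_and]; intro h; exact absurd h.symm hc
      simp only [this]
      simp [hc, ih, pvSplitAux]

theorem pvSplitOn_eq (cs : List Char) : PySem.Chars.splitOn cs "-".toList = pvSplitAux cs [] := by
  show PySem.Chars.splitOn.go _ _ _ _ _ = _
  simpa using pvGoLem cs [] []

def pvScanParts : List (List Char) → Option (List Char)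
  | p :: q :: rest => if p = "TPCDS".toList then some q else pvScanParts (q :: rest)
  | _ => none

theorem pvALoop_gen (suf : List (List Char)) : ∀ (pre : List (List Char)),
    pvALoop (pre ++ suf) (PySem.List.enumerate suf pre.length) =
      (pvScanParts suf).map ("TPCDS-".toList ++ ·) := by
  induction suf with
  | nil => intro pre; simp [PySem.List.enumerate_nil, pvALoop, pvScanParts]
  | cons x suf ih =>
    intro pre
    rw [PySem.List.enumerate_cons, pvALoop]
    by_cases hx : x = "TPCDS".toList
    · cases suf with
      | nil =>
        have hlen : ¬ ((pre.length : Int) + 1 < ((pre ++ [x]).length : Int)) := by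
          simp
        simp only [hx, true_and]
        simp [pvALoop, PySem.List.enumerate_nil, pvScanParts]
      | cons y suf' =>
        have hlen : ((pre.length : Int) + 1 < ((pre ++ x :: y :: suf').length : Int)) := by
          simp
        rw [if_pos ⟨hx, hlen⟩]
        have : PySem.List.pyGet? (pre ++ x :: y :: suf') ((pre.length : Int) + 1) = some y := by
          have := PySem.List.pyGet?_append_length (pre := pre ++ [x]) (y := y) (ys := suf')
          simpa using this
        rw [this]
        simp [pvScanParts, hx]
    · rw [if_neg (by intro hc; exact hx hc.1)]
      have := ih (pre ++ [x])
      rw [show (pre ++ [x]).length = pre.length + 1 by simp] at this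
      push_cast at this
      simp only [List.append_assoc, List.cons_append, List.nil_append] at this
      rw [this]
      cases suf with
      | nil => simp [pvScanParts]
      | cons y suf' =>
        rw [show pvScanParts (x :: y :: suf') = pvScanParts (y :: suf') from by
          rw [pvScanParts, if_neg hx]]
        simp

theorem pvALoop_eq (parts : List (List Char)) :
    pvALoop parts (PySem.List.enumerate parts 0) = (pvScanParts parts).map ("TPCDS-".toList ++ ·) := by
  simpa using pvALoop_gen parts []

theorem pvFindGo_shift (sub : List Char) (l : List Char) : ∀ k : Nat,
    PySem.Chars.find.go sub l k =
      if PySem.Chars.find.go sub l 0 = -1 then -1 else (k : Int) + PySem.Chars.find.go sub l 0 := by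
  induction l with
  | nil =>
    intro k
    rw [PySem.Chars.find.go.eq_def, PySem.Chars.find.go.eq_def]
    by_cases h : sub.isEmpty <;> simp [h]
  | cons c t ih =>
    intro k
    rw [PySem.Chars.find.go.eq_def]
    conv_rhs => rw [PySem.Chars.find.go.eq_def]
    by_cases h : sub.isPrefixOf (c :: t)
    · simp [h]
    · simp only [h, Bool.false_eq_true]
      rw [ih (k + 1), ih 1]
      by_cases h0 : PySem.Chars.find.go sub t 0 = -1
      · simp [h0]
      · simp only [h0, if_neg, not_false_iff]
        have hge : -1 ≤ PySem.Chars.find.go sub t 0 := PySem.Chars.neg_one_le_find t sub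
        rw [if_neg (by omega)]
        push_cast
        ring

theorem pvFind_cons (sub : List Char) (c : Char) (l : List Char) :
    PySem.Chars.find (c :: l) sub =
      if sub.isPrefixOf (c :: l) then 0
      else (if PySem.Chars.find l sub = -1 then -1 else 1 + PySem.Chars.find l sub) := by
  show PySem.Chars.find.go sub (c :: l) 0 = _
  rw [PySem.Chars.find.go.eq_def]
  by_cases h : sub.isPrefixOf (c :: l)
  · simp [h]
  · simp only [h, Bool.false_eq_true]
    rw [pvFindGo_shift sub l 1]
    rfl

def pvFscan : List Char → Option (List Char)
  | [] => none
  | c :: l =>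
    if "-TPCDS-".toList.isPrefixOf (c :: l) then some (((c :: l).drop 7).takeWhile (· ≠ '-'))
    else pvFscan l

theorem pvTakeUntil (rest : List Char) :
    (if PySem.Chars.find rest "-".toList = -1 then rest
     else rest.take (PySem.Chars.find rest "-".toList).toNat) = rest.takeWhile (· ≠ '-') := by
  induction rest with
  | nil => simp
  | cons c l ih =>
    by_cases hc : c = '-'
    · subst hc
      have hfind : PySem.Chars.find ('-' :: l) "-".toList = 0 := by
        rw [pvFind_cons "-".toList '-' l, if_pos (by simp [List.isPrefixOf])]
      rw [hfind]
      simp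
    · have hpre : ¬ "-".toList.isPrefixOf (c :: l) = true := by
        rw [List.isPrefixOf_iff_prefix, show "-".toList = ['-'] from rfl]
        intro h
        rcases h with ⟨t, ht⟩
        simp at ht
        exact hc ht.1.symm
      have hfind : PySem.Chars.find (c :: l) "-".toList =
          if PySem.Chars.find l "-".toList = -1 then -1 else 1 + PySem.Chars.find l "-".toList := by
        rw [pvFind_cons "-".toList c l, if_neg hpre]
      by_cases h0 : PySem.Chars.find l "-".toList = -1
      · rw [hfind, if_pos h0, if_pos rfl]
        rw [if_pos h0] at ih
        rw [List.takeWhile_cons_of_pos (by simp [hc])]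
        rw [← ih]
      · have hge : -1 ≤ PySem.Chars.find l "-".toList := PySem.Chars.neg_one_le_find l _
        rw [hfind, if_neg h0, if_neg (by omega)]
        rw [if_neg h0] at ih
        rw [show ((1 : Int) + PySem.Chars.find l "-".toList).toNat
              = (PySem.Chars.find l "-".toList).toNat + 1 by omega]
        rw [List.takeWhile_cons_of_pos (by simp [hc])]
        rw [List.take_succ_cons, ih]

def pvBCore (cs : List Char) : Option (List Char) :=
  let p := PySem.Chars.find cs "-TPCDS-".toList
  if p = -1 then none
  else
    let rest := PySem.Chars.slice cs (some (p + 7)) none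
    let q := PySem.Chars.find rest "-".toList
    some (if q = -1 then rest else PySem.Chars.slice rest none (some q))

theorem pvBCore_eq (cs : List Char) : pvBCore cs = pvFscan cs := by
  induction cs with
  | nil =>
    simp only [pvBCore, pvFscan]
    rw [if_pos (by decide)]
  | cons c l ih =>
    by_cases hpre : "-TPCDS-".toList.isPrefixOf (c :: l) = true
    · have hfind : PySem.Chars.find (c :: l) "-TPCDS-".toList = 0 := by
        rw [pvFind_cons "-TPCDS-".toList c l, if_pos hpre]
      simp only [pvBCore, pvFscan, hfind, if_pos hpre]
      rw [if_neg (by omega)]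
      have hslice : PySem.Chars.slice (c :: l) (some ((0 : Int) + 7)) none = (c :: l).drop 7 := by
        rw [PySem.Chars.slice_eq_listSlice]
        rw [show ((0 : Int) + 7) = ((7 : Nat) : Int) by norm_num]
        exact PySem.List.slice_from_natCast _ _
      rw [hslice]
      have hq := PySem.Chars.neg_one_le_find ((c :: l).drop 7) "-".toList
      have htail : (if PySem.Chars.find ((c :: l).drop 7) "-".toList = -1 then (c :: l).drop 7
          else PySem.Chars.slice ((c :: l).drop 7) none
            (some (PySem.Chars.find ((c :: l).drop 7) "-".toList))) =
          ((c :: l).drop 7).takeWhile (· ≠ '-') := by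
        rw [← pvTakeUntil ((c :: l).drop 7)]
        by_cases h1 : PySem.Chars.find ((c :: l).drop 7) "-".toList = -1
        · rw [if_pos h1, if_pos h1]
        · rw [if_neg h1, if_neg h1, PySem.Chars.slice_eq_listSlice,
            PySem.List.slice_to _ (by omega)]
      rw [htail]
    · have hge := PySem.Chars.neg_one_le_find l "-TPCDS-".toList
      have hfind : PySem.Chars.find (c :: l) "-TPCDS-".toList =
          if PySem.Chars.find l "-TPCDS-".toList = -1 then -1
          else 1 + PySem.Chars.find l "-TPCDS-".toList := by
        rw [pvFind_cons "-TPCDS-".toList c l, if_neg hpre]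
      by_cases h0 : PySem.Chars.find l "-TPCDS-".toList = -1
      · simp only [pvBCore, pvFscan, hfind, if_pos h0, hpre, if_false, Bool.false_eq_true]
        rw [if_pos trivial, ← ih]
        simp only [pvBCore, if_pos h0]
      · simp only [pvBCore, pvFscan, hfind, if_neg h0, hpre, if_false, Bool.false_eq_true]
        rw [if_neg (by omega)]
        simp only [pvBCore, if_neg h0] at ih
        rw [← ih]
        have hr : PySem.Chars.slice (c :: l)
              (some (1 + PySem.Chars.find l "-TPCDS-".toList + 7)) none =
            PySem.Chars.slice l (some (PySem.Chars.find l "-TPCDS-".toList + 7)) none := by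
          rw [PySem.Chars.slice_eq_listSlice, PySem.Chars.slice_eq_listSlice,
            PySem.List.slice_from _ (by omega), PySem.List.slice_from _ (by omega)]
          rw [show (1 + PySem.Chars.find l "-TPCDS-".toList + 7).toNat
                = (PySem.Chars.find l "-TPCDS-".toList + 7).toNat + 1 by omega]
          rw [List.drop_succ_cons]
        rw [hr]

theorem pvSplitAux_append (seg : List Char) (hseg : '-' ∉ seg) (rest : List Char) :
    ∀ cur, pvSplitAux (seg ++ '-' :: rest) cur = (cur.reverse ++ seg) :: pvSplitAux rest [] := by
  induction seg with
  | nil => intro cur; simp [pvSplitAux]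
  | cons c seg' ih =>
    intro cur
    have hc : c ≠ '-' := fun h => hseg (h ▸ List.mem_cons_self)
    simp only [List.cons_append, pvSplitAux, if_neg hc]
    rw [ih (fun h => hseg (List.mem_cons_of_mem _ h)) (c :: cur)]
    simp

theorem pvSplitAux_no_dash (cs : List Char) (h : '-' ∉ cs) :
    ∀ cur, pvSplitAux cs cur = [cur.reverse ++ cs] := by
  induction cs with
  | nil => intro cur; simp [pvSplitAux]
  | cons c rest ih =>
    intro cur
    have hc : c ≠ '-' := fun hh => h (hh ▸ List.mem_cons_self)
    simp only [pvSplitAux, if_neg hc]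
    rw [ih (fun hh => h (List.mem_cons_of_mem _ hh)) (c :: cur)]
    simp

theorem pvSplitAux_head (cs : List Char) :
    ∀ cur, ∃ t, pvSplitAux cs cur = (cur.reverse ++ cs.takeWhile (· ≠ '-')) :: t := by
  induction cs with
  | nil => intro cur; exact ⟨[], by simp [pvSplitAux]⟩
  | cons c rest ih =>
    intro cur
    by_cases hc : c = '-'
    · subst hc
      refine ⟨pvSplitAux rest [], ?_⟩
      simp [pvSplitAux]
    · obtain ⟨t, ht⟩ := ih (c :: cur)
      refine ⟨t, ?_⟩
      simp only [pvSplitAux, if_neg hc, ht]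
      rw [List.takeWhile_cons_of_pos (by simp [hc])]
      simp

theorem pvFscan_no_dash (cs : List Char) (h : '-' ∉ cs) : pvFscan cs = none := by
  induction cs with
  | nil => rfl
  | cons c l ih =>
    have hc : c ≠ '-' := fun hh => h (hh ▸ List.mem_cons_self)
    rw [pvFscan, if_neg ?_, ih (fun hh => h (List.mem_cons_of_mem _ hh))]
    rw [List.isPrefixOf_iff_prefix]
    intro hp
    rcases hp with ⟨t, ht⟩
    have : c = '-' := by
      have := congrArg (·.head?) ht
      simpa using this.symm
    exact hc this

theorem pvFscan_seg (seg : List Char) (hseg : '-' ∉ seg) (rest : List Char) :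
    pvFscan (seg ++ '-' :: rest) = pvFscan ('-' :: rest) := by
  induction seg with
  | nil => rfl
  | cons c seg' ih =>
    have hc : c ≠ '-' := fun h => hseg (h ▸ List.mem_cons_self)
    rw [List.cons_append, pvFscan, if_neg ?_, ih (fun h => hseg (List.mem_cons_of_mem _ h))]
    rw [List.isPrefixOf_iff_prefix]
    intro hp
    rcases hp with ⟨t, ht⟩
    have : c = '-' := by
      have := congrArg (·.head?) ht
      simpa using this.symm
    exact hc this

theorem pvPrefIff (rest : List Char) :
    "-TPCDS-".toList.isPrefixOf ('-' :: rest) = true ↔ "TPCDS-".toList <+: rest := by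
  rw [List.isPrefixOf_iff_prefix, show "-TPCDS-".toList = '-' :: "TPCDS-".toList from rfl]
  exact List.cons_prefix_cons.trans (by simp)

theorem pvMainAux : ∀ (n : Nat) (cs : List Char), cs.length ≤ n → ¬ "TPCDS-".toList <+: cs →
    pvScanParts (pvSplitAux cs []) = pvFscan cs := by
  intro n
  induction n with
  | zero =>
    intro cs hlen _
    have : cs = [] := List.length_eq_zero_iff.mp (Nat.le_zero.mp hlen)
    subst this
    rfl
  | succ n ih =>
    intro cs hlen h
    rcases hd : cs.dropWhile (· ≠ '-') with _ | ⟨d, rest⟩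
    · -- no dash in cs
      have hnd : '-' ∉ cs := by
        intro hmem
        have hall := List.dropWhile_eq_nil_iff.mp hd
        have := hall _ hmem
        simp at this
      rw [pvSplitAux_no_dash cs hnd [], pvFscan_no_dash cs hnd]
      rfl
    · have hdd : d = '-' := by
        have hne : cs.dropWhile (· ≠ '-') ≠ [] := by rw [hd]; simp
        have h1 := List.head_dropWhile_not (fun x => decide (x ≠ '-')) hne
        have h3 : (cs.dropWhile (· ≠ '-')).head? = some d := by rw [hd]; rfl
        have h4 : d = (cs.dropWhile (· ≠ '-')).head hne :=
          Option.some.inj (h3.symm.trans (List.head?_eq_some_head hne))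
        have h5 : decide (d ≠ '-') = false := by rw [h4]; exact h1
        simpa using h5
      subst hdd
      set seg := cs.takeWhile (· ≠ '-') with hseg_def
      have hcs : cs = seg ++ '-' :: rest := by
        rw [hseg_def, ← hd, List.takeWhile_append_dropWhile]
      have hseg : '-' ∉ seg := by
        intro hmem
        have := List.mem_takeWhile_imp hmem
        simp at this
      have hsegne : seg ≠ "TPCDS".toList := by
        intro he
        apply h
        rw [hcs, he]
        exact ⟨rest, rfl⟩
      have hlrest : rest.length ≤ n := by
        have := congrArg List.length hcs
        simp at this
        omega
      -- left side: split off the first segment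
      rw [hcs, pvSplitAux_append seg hseg rest []]
      simp only [List.reverse_nil, List.nil_append]
      -- right side
      rw [pvFscan_seg seg hseg rest]
      by_cases htp : "TPCDS-".toList <+: rest
      · rcases htp with ⟨tail, htail⟩
        have hrest : rest = "TPCDS".toList ++ '-' :: tail := by rw [← htail]; rfl
        rw [hrest, pvSplitAux_append "TPCDS".toList (by decide) tail []]
        simp only [List.reverse_nil, List.nil_append]
        obtain ⟨t, ht⟩ := pvSplitAux_head tail []
        simp only [List.reverse_nil, List.nil_append] at ht
        rw [ht]
        rw [pvScanParts, if_neg hsegne, pvScanParts, if_pos rfl]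
        rw [pvFscan, if_pos ((pvPrefIff _).mpr ⟨tail, by rfl⟩)]
        rfl
      · obtain ⟨t, ht⟩ := pvSplitAux_head rest []
        simp only [List.reverse_nil, List.nil_append] at ht
        rw [ht, pvScanParts, if_neg hsegne, ← ht]
        rw [pvFscan, if_neg (by rw [pvPrefIff]; exact htp)]
        exact ih rest hlrest htp

theorem pvMain (cs : List Char) (h : ¬ "TPCDS-".toList <+: cs) :
    pvScanParts (pvSplitAux cs []) = pvFscan cs :=
  pvMainAux cs.length cs le_rfl h


theorem pv_branch_eq (cs : List Char) (h : ¬ "TPCDS-".toList <+: cs) (q : String) :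
    (match pvALoop (PySem.Chars.splitOn cs "-".toList)
        (PySem.List.enumerate (PySem.Chars.splitOn cs "-".toList) 0) with
      | some r => String.ofList r
      | none => q) =
    (let p := PySem.Chars.find cs "-TPCDS-".toList
     if p ≠ -1 then
       let rest := PySem.Chars.slice cs (some (p + 7)) none
       let q' := PySem.Chars.find rest "-".toList
       let nxt := if q' = -1 then rest else PySem.Chars.slice rest none (some q')
       String.ofList ("TPCDS-".toList ++ nxt)
     else q) := by
  rw [pvSplitOn_eq, pvALoop_eq, pvMain cs h]
  have hb := (pvBCore_eq cs).symm
  rcases hscan : pvFscan cs with _ | t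
  · rw [hscan] at hb
    simp only [pvBCore] at hb
    by_cases hp : PySem.Chars.find cs "-TPCDS-".toList = -1
    · simp only [hp, ite_not]
      rw [if_pos trivial]
      rfl
    · rw [if_neg hp] at hb
      exact absurd hb (by simp)
  · rw [hscan] at hb
    simp only [pvBCore] at hb
    by_cases hp : PySem.Chars.find cs "-TPCDS-".toList = -1
    · rw [if_pos hp] at hb
      exact absurd hb (by simp)
    · rw [if_neg hp] at hb
      simp only [Option.some.injEq] at hb
      simp only [ite_not]
      rw [if_neg hp]
      rw [← hb]
      rfl

-- ===== VERDICT (by name: the statement is the Claim_ definition above) =====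
theorem normalize_query_name_spec : Claim_equal_normalize_query_name := by
  intro q e _
  unfold Spec_normalize_query_name normalize_query_name normalize_query_name_alt
  by_cases h1 : PySem.Str.startswith q "TPCDS-" = true
  · rw [if_pos h1, if_pos h1]
  · rw [if_neg h1, if_neg h1]
    by_cases h2 : (e == "e6data" && PySem.Str.startswith q "query-") = true
    · rw [if_pos h2, if_pos h2]
      have hnp : ¬ "TPCDS-".toList <+: q.toList := by
        intro hp
        apply h1
        rw [PySem.Str.startswith_eq]
        exact (PySem.Chars.startswith_iff _ _).mpr hp
      exact pv_branch_eq q.toList hnp q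
    · rw [if_neg h2, if_neg h2]
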